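-- pv_equiv track=rewrite | github.com/ProtossLuigi/random-projects | c4/__main__.py | board_to_int
-- ===== SOURCE A (Python) =====
-- def get_cols(board, width, height):
--     return [[board[height - 1 - y][x] for y in range(height)] for x in range(width)]
--
-- def col_to_int(col):
--     height = len(col)
--     val = 0
--     for i in range(height):
--         val += col[i] << i
--     return val
--
-- def board_to_int(board):
--     width = len(board)
--     height = len(board[0])
--     vert_states = (1 << (height + 1)) - 1
--     cols = get_cols(board, width, height)
--     state = 0
--     for col in cols:
--         state *= vert_states
--         state += col_to_int(col)
--     return state
-- ===== SOURCE B (Python) =====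
-- def board_to_int(board):
--     width = len(board)
--     height = len(board[0])
--     vert_states = (1 << (height + 1)) - 1
--     p = [1]
--     for _ in range(width - 1):
--         p.append(p[-1] * vert_states)
--     total = 0
--     for x in range(width):
--         colval = 0
--         for y in range(height):
--             colval += board[height - 1 - y][x] << y
--         total += colval * p[width - 1 - x]
--     return total
-- ===== Notes on version B (the rewrite author's own statement) =====
-- stated objective: alternative
-- what changed: Replaces the transpose (get_cols) plus Horner fold over columns with a precomputed table of vert_states powers and a single weighted-sum pass that adds each column's value times its table weight.
import Mathlib
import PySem

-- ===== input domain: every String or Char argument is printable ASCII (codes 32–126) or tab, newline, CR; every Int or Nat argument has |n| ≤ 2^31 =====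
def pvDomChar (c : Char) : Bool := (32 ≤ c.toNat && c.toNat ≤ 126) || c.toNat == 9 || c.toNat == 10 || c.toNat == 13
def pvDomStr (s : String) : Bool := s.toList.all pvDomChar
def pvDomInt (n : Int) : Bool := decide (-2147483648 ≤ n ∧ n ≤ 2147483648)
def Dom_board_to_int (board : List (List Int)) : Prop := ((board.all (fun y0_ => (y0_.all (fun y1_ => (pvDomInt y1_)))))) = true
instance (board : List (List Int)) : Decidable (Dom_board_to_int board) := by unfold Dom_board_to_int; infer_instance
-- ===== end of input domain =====

-- B replaces A's transpose-plus-Horner fold with a precomputed power table and one weighted-sum pass (alternative decomposition, same cost).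


-- ===== PORT A =====
def get_cols (board : List (List Int)) (width height : Int) : List (List Int) :=
  (PySem.List.pyRange 0 width).map (fun x =>
    (PySem.List.pyRange 0 height).map (fun y =>
      PySem.List.pyGetD (PySem.List.pyGetD board (height - 1 - y) []) x 0))

def col_to_int (col : List Int) : Int :=
  let height : Int := col.length
  (PySem.List.pyRange 0 height).foldl
    (fun val i => val + (PySem.List.pyGetD col i 0) <<< i.toNat) 0

def board_to_int (board : List (List Int)) : Int :=
  let width : Int := board.length
  let height : Int := (PySem.List.pyGetD board 0 []).length
  let vert_states : Int := (1 <<< (height + 1).toNat) - 1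
  let cols := get_cols board width height
  cols.foldl (fun state col => state * vert_states + col_to_int col) 0

-- ===== PORT B =====
def board_to_int_alt (board : List (List Int)) : Int :=
  let width : Int := board.length
  let height : Int := (PySem.List.pyGetD board 0 []).length
  let vert_states : Int := (1 <<< (height + 1).toNat) - 1
  let p : List Int :=
    (PySem.List.pyRange 0 (width - 1)).foldl
      (fun p _ => p ++ [PySem.List.pyGetD p (-1) 1 * vert_states]) [1]
  (PySem.List.pyRange 0 width).foldl (fun total x =>
    let colval :=
      (PySem.List.pyRange 0 height).foldl (fun cv y =>
        cv + PySem.List.pyGetD (PySem.List.pyGetD board (height - 1 - y) []) x 0 <<< y.toNat) 0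
    total + colval * PySem.List.pyGetD p (width - 1 - x) 1) 0

-- ===== PRECONDITION & SPEC =====
-- Pre_ excludes exactly the boards on which the Python A raises IndexError: the empty board
-- (board[0]) and ragged/short boards where some accessed board[height-1-y][x] is out of range.
def Pre_board_to_int (board : List (List Int)) : Prop :=
  board ≠ [] ∧ (board.headD []).length ≤ board.length ∧
    ∀ row ∈ board.take (board.headD []).length, board.length ≤ row.length
instance (board : List (List Int)) : Decidable (Pre_board_to_int board) := by
  unfold Pre_board_to_int; infer_instance

def pvWitness_board_to_int : List (List Int) := [[0, 1], [1, 0]]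

def Spec_board_to_int (board : List (List Int)) (out : Int) : Prop := out = board_to_int_alt board
instance (board : List (List Int)) (out : Int) : Decidable (Spec_board_to_int board out) := by unfold Spec_board_to_int; infer_instance

-- ===== CLAIM (what is proved, stated in full; the proofs are below) =====
def Claim_equal_board_to_int : Prop := ∀ (board : List (List Int)), Dom_board_to_int board → Pre_board_to_int board → Spec_board_to_int board (board_to_int board)

-- ===== LEMMAS AND PROOFS =====

-- the cell both programs read at column x, row y (same pyGetD expression in both ports)
def pvCell (board : List (List Int)) (ht : Nat) (x y : Int) : Int :=
  PySem.List.pyGetD (PySem.List.pyGetD board ((ht : Int) - 1 - y) []) x 0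

-- Horner-style weighted sum A's final fold computes
def pvHorner (f : List Int → Int) (vs : Int) : List (List Int) → Int
  | [] => 0
  | c :: cs => f c * vs ^ cs.length + pvHorner f vs cs

-- a Finset.range sum IS the sum of the mapped List.range (definitional)
theorem pvSumRange (f : Nat → Int) (n : Nat) :
    ((List.range n).map f).sum = ∑ i ∈ Finset.range n, f i := Int.neg_inj.mp rfl

theorem pvHorner_append_singleton (f : List Int → Int) (vs : Int) (L : List (List Int)) (c : List Int) :
    pvHorner f vs (L ++ [c]) = vs * pvHorner f vs L + f c := by
  induction L with
  | nil => simp [pvHorner]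
  | cons a L ih => simp [pvHorner, ih]; ring

theorem pvFoldl_horner (f : List Int → Int) (vs : Int) (cols : List (List Int)) (a : Int) :
    cols.foldl (fun s c => s * vs + f c) a = a * vs ^ cols.length + pvHorner f vs cols := by
  induction cols generalizing a with
  | nil => simp [pvHorner]
  | cons c cs ih => simp [pvHorner, ih, pow_succ]; ring

theorem pvHorner_range (f : List Int → Int) (vs : Int) (g : Nat → List Int) (w : Nat) :
    pvHorner f vs ((List.range w).map g) =
      ∑ x ∈ Finset.range w, f (g x) * vs ^ (w - 1 - x) := by
  induction w with
  | zero => simp [pvHorner]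
  | succ w ih =>
    rw [List.range_succ, List.map_append, List.map_singleton,
      pvHorner_append_singleton, ih, Finset.sum_range_succ, Finset.mul_sum]
    simp only [Nat.add_sub_cancel, Nat.sub_self, pow_zero, mul_one]
    congr 1
    refine Finset.sum_congr rfl (fun x hx => ?_)
    have hx' : x < w := Finset.mem_range.mp hx
    have h1 : w - x = (w - 1 - x) + 1 := by omega
    rw [h1, pow_succ]; ring

theorem pvFoldl_const {α β : Type} (L : List α) (step : β → β) (a : β) :
    L.foldl (fun acc _ => step acc) a = step^[L.length] a := by
  induction L generalizing a with
  | nil => rfl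
  | cons x L ih => simp [List.foldl_cons, ih, Function.iterate_succ_apply]

theorem pvPow_table (vs : Int) (k : Nat) :
    (fun p => p ++ [PySem.List.pyGetD p (-1) 1 * vs])^[k] [1] =
      (List.range (k + 1)).map (vs ^ ·) := by
  induction k with
  | zero => simp
  | succ k ih =>
    rw [Function.iterate_succ_apply', ih]
    have hget : PySem.List.pyGetD ((List.range (k + 1)).map (vs ^ ·)) (-1) 1 = vs ^ k := by
      rw [PySem.List.pyGetD_neg_ofNat _ 1 1 (by omega) (by simp)]
      simp
    rw [hget, List.range_succ (n := k + 1)]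
    simp [pow_succ]

theorem pvLength_pyRange (n : Nat) : (PySem.List.pyRange 0 (n : Int)).length = n := by
  rw [PySem.List.pyRange_zero_natCast]; simp

-- A's col_to_int on one transposed column, as a closed sum
theorem pvCol_to_int (g : Int → Int) (ht : Nat) :
    col_to_int ((PySem.List.pyRange 0 (ht : Int)).map g) =
      ∑ y ∈ Finset.range ht, g y * 2 ^ y := by
  simp only [col_to_int]
  have hlen : ((((PySem.List.pyRange 0 (ht : Int)).map g).length : Nat) : Int) = (ht : Int) := by
    simp
  rw [hlen, PySem.List.pyRange_zero_natCast, List.foldl_map]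
  rw [PySem.List.foldl_add _ (fun i : Nat =>
    PySem.List.pyGetD ((List.map (fun k : Nat => (k : Int)) (List.range ht)).map g) (i : Int) 0
      <<< ((i : Int)).toNat) 0]
  rw [zero_add]
  rw [List.map_congr_left (l := List.range ht) (g := fun i : Nat => g i * 2 ^ i)
    (by
      intro i hi
      have hi' : i < ht := List.mem_range.mp hi
      rw [PySem.List.pyGetD_natCast, List.getD_eq_getElem _ _ (by simp [hi'])]
      simp [Int.shiftLeft_eq])]
  exact pvSumRange _ ht

-- B's inner loop over one column, as a closed sum
theorem pvInner (board : List (List Int)) (htN : Nat) (x : Int) :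
    (PySem.List.pyRange 0 (htN : Int)).foldl
      (fun cv y => cv + PySem.List.pyGetD (PySem.List.pyGetD board ((htN : Int) - 1 - y) []) x 0
          <<< y.toNat) 0
    = ∑ y ∈ Finset.range htN, pvCell board htN x y * 2 ^ y := by
  rw [PySem.List.pyRange_zero_natCast, List.foldl_map]
  rw [PySem.List.foldl_add _ (fun y : Nat =>
    PySem.List.pyGetD (PySem.List.pyGetD board ((htN : Int) - 1 - (y : Int)) []) x 0
      <<< ((y : Int)).toNat) 0]
  rw [zero_add]
  rw [List.map_congr_left (l := List.range htN) (g := fun y : Nat => pvCell board htN x y * 2 ^ y)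
    (by
      intro y hy
      simp [pvCell, Int.shiftLeft_eq])]
  exact pvSumRange _ htN

-- ===== VERDICT (by name: the statement is the Claim_ definition above) =====
theorem board_to_int_spec : Claim_equal_board_to_int := by
  intro board _ hpre
  show board_to_int board = board_to_int_alt board
  simp only [board_to_int, board_to_int_alt, get_cols]
  obtain ⟨hne, -, -⟩ := hpre
  have hw1 : 1 ≤ board.length := List.length_pos_iff.mpr hne
  generalize ((1 <<< (((PySem.List.pyGetD board 0 []).length : Int) + 1).toNat : Nat) : Int) - 1 = vs
  set wN := board.length with hwdef
  set htN := (PySem.List.pyGetD board 0 []).length with hhdef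
  -- the power table B builds is the list of powers of vs
  have hcast : ((wN : Int) - 1) = ((wN - 1 : Nat) : Int) := by omega
  have hp : (PySem.List.pyRange 0 ((wN : Int) - 1)).foldl
      (fun p _ => p ++ [PySem.List.pyGetD p (-1) 1 * vs]) [1]
      = (List.range wN).map (vs ^ ·) := by
    rw [hcast, pvFoldl_const, pvLength_pyRange, pvPow_table]
    congr 2
    omega
  rw [hp]
  -- power-table lookup
  have hpget : ∀ x : Nat, x < wN →
      PySem.List.pyGetD ((List.range wN).map (vs ^ ·)) ((wN : Int) - 1 - (x : Int)) 1
        = vs ^ (wN - 1 - x) := by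
    intro x hx
    have hc : ((wN : Int) - 1 - (x : Int)) = ((wN - 1 - x : Nat) : Int) := by omega
    rw [hc, PySem.List.pyGetD_natCast, List.getD_eq_getElem _ _ (by simp; omega)]
    simp
  -- A's side: Horner fold over the transposed columns
  rw [pvFoldl_horner, zero_mul, zero_add]
  conv_lhs => rw [PySem.List.pyRange_zero_natCast (n := wN), List.map_map]
  rw [pvHorner_range]
  -- B's side: fold of folds into a double sum
  simp only [pvInner]

  rw [PySem.List.pyRange_zero_natCast (n := wN), List.foldl_map]
  rw [PySem.List.foldl_add _ (fun x : Nat =>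
      (∑ y ∈ Finset.range htN, pvCell board htN (x : Int) y * 2 ^ y)
        * PySem.List.pyGetD ((List.range wN).map (vs ^ ·)) ((wN : Int) - 1 - (x : Int)) 1) 0]
  rw [zero_add, pvSumRange]
  refine Finset.sum_congr rfl (fun x hx => ?_)
  have hx' : x < wN := Finset.mem_range.mp hx
  rw [hpget x hx', Function.comp, pvCol_to_int (fun y => PySem.List.pyGetD (PySem.List.pyGetD board ((htN : Int) - 1 - y) []) (x : Int) 0) htN]
  rfl
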